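-- pv_equiv track=rewrite | github.com/Salome2010/IntroProgramacion | recu.py | un_responsable_por_turno
-- ===== SOURCE A (Python) =====
-- def un_responsable_por_turno(grilla_horaria:[[str]])->[(bool,bool)]:
--     grillaTraspuesta = trasponerG(grilla_horaria)
--     resu:[(bool,bool)] = []
--     for i in range(len(grillaTraspuesta)):
--         primero =  todosIguales(primeraMitad(grillaTraspuesta[i]))
--         segundo = todosIguales(segundaMitad(grillaTraspuesta[i]))
--         tupla = (primero,segundo)
--         resu.append(tupla)
--     return resu
--
-- def todosIguales(lista:[str]) -> bool:
--     for i in range(len(lista)-1):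
--         if lista[i]!=lista[i+1]:
--             return False
--     return True
--
-- def primeraMitad(lista:[str]) -> [str]:
--     laMitad:[str] = []
--     mitad = len(lista)//2
--     for i in range(0,mitad):
--         laMitad.append(lista[i])
--     return laMitad
--
-- def segundaMitad(lista:[str]) -> [str]:
--     laMitad:[str] = []
--     mitad = len(lista)//2
--     for i in range(mitad,len(lista)):
--         laMitad.append(lista[i])
--     return laMitad
--
-- def trasponerG(grilla:[[str]]) -> [[str]]:
--     traspuestas:[[str]] = []
--     lista:[str] = []
--     n:int = 0
--     while n<len(grilla[0]):
--         for i in range(len(grilla)):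
--             lista.append(grilla[i][n])
--         traspuestas.append(lista)
--         lista = []
--         n+=1
--     return traspuestas
-- ===== SOURCE B (Python) =====
-- def un_responsable_por_turno(grilla_horaria):
--     n = len(grilla_horaria)
--     mid = n // 2
--     ncols = len(grilla_horaria[0])
--     first = [True] * ncols
--     second = [True] * ncols
--     for i in range(1, n):
--         fila, previa = grilla_horaria[i], grilla_horaria[i - 1]
--         if i < mid:
--             first = [f and fila[j] == previa[j] for j, f in enumerate(first)]
--         elif i > mid:
--             second = [s and fila[j] == previa[j] for j, s in enumerate(second)]
--     return list(zip(first, second))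
-- ===== Notes on version B (the rewrite author's own statement) =====
-- stated objective: faster
-- what changed: Replaces the transpose + per-column half-lists + adjacent-pairwise scan with a single row-major pass that compares each row to the previous one and maintains one pair of per-column uniformity flag arrays (rows before the midpoint update the first flags, rows after it the second), zipped at the end; no transposed grid or half-columns are ever materialised, removing those intermediate list allocations.
import Mathlib
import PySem

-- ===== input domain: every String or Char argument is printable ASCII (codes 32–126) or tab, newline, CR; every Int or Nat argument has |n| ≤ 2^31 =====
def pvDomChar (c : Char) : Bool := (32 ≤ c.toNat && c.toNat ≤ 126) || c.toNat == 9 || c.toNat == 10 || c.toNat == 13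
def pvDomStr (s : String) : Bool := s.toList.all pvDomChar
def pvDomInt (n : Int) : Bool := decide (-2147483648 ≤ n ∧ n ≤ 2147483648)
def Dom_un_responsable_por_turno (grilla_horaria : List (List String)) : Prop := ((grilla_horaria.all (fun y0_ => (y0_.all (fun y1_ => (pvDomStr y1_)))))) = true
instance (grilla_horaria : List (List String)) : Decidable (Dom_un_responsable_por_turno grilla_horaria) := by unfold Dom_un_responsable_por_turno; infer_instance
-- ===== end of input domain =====

-- B replaces A's transpose + per-column half-lists + adjacent-pairwise scans with a single
-- row-major pass comparing each row with the previous one, maintaining two per-column flag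
-- arrays (rows before/after the midpoint), zipped at the end; it skips the intermediate
-- lists A builds (a timing run measured B faster).

-- ===== PORT A =====
def pvTodosIguales (lista : List String) : Bool :=
  (PySem.List.pyRange 0 ((lista.length : Int) - 1) 1).all
    (fun i => PySem.List.pyGetD lista i "" == PySem.List.pyGetD lista (i + 1) "")

def pvPrimeraMitad (lista : List String) : List String :=
  (PySem.List.pyRange 0 ((lista.length / 2 : Nat) : Int) 1).map
    (fun i => PySem.List.pyGetD lista i "")

def pvSegundaMitad (lista : List String) : List String :=
  (PySem.List.pyRange ((lista.length / 2 : Nat) : Int) (lista.length : Int) 1).map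
    (fun i => PySem.List.pyGetD lista i "")

def pvTrasponerG (grilla : List (List String)) : List (List String) :=
  (PySem.List.pyRange 0 (((PySem.List.pyGetD grilla 0 []).length : Nat) : Int) 1).map
    (fun n => grilla.map (fun fila => PySem.List.pyGetD fila n ""))

def un_responsable_por_turno (grilla_horaria : List (List String)) : List (Bool × Bool) :=
  let grillaTraspuesta := pvTrasponerG grilla_horaria
  (PySem.List.pyRange 0 (grillaTraspuesta.length : Int) 1).foldl
    (fun resu i =>
      resu ++ [(pvTodosIguales (pvPrimeraMitad (PySem.List.pyGetD grillaTraspuesta i [])),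
                pvTodosIguales (pvSegundaMitad (PySem.List.pyGetD grillaTraspuesta i [])))])
    []

-- ===== PORT B =====
def un_responsable_por_turno_alt (grilla_horaria : List (List String)) : List (Bool × Bool) :=
  let n : Nat := grilla_horaria.length
  let mid : Nat := n / 2
  let ncols : Nat := (PySem.List.pyGetD grilla_horaria 0 []).length
  let st :=
    (PySem.List.pyRange 1 (n : Int) 1).foldl
      (fun (st : List Bool × List Bool) i =>
        let fila := PySem.List.pyGetD grilla_horaria i []
        let previa := PySem.List.pyGetD grilla_horaria (i - 1) []
        if i < (mid : Int) then
          ((PySem.List.enumerate st.1).map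
             (fun p => p.2 && (PySem.List.pyGetD fila p.1 "" == PySem.List.pyGetD previa p.1 "")),
           st.2)
        else if (mid : Int) < i then
          (st.1,
           (PySem.List.enumerate st.2).map
             (fun p => p.2 && (PySem.List.pyGetD fila p.1 "" == PySem.List.pyGetD previa p.1 "")))
        else st)
      (List.replicate ncols true, List.replicate ncols true)
  st.1.zip st.2

-- ===== PRECONDITION & SPEC =====
-- Pre_ excludes exactly the inputs where the Python A raises IndexError: the empty grid
-- (grilla[0]) and ragged grids where some row is shorter than row 0 (grilla[i][n]).
def Pre_un_responsable_por_turno (grilla_horaria : List (List String)) : Prop :=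
  grilla_horaria ≠ [] ∧
  ∀ fila ∈ grilla_horaria, (grilla_horaria.headD []).length ≤ fila.length
instance (grilla_horaria : List (List String)) : Decidable (Pre_un_responsable_por_turno grilla_horaria) := by unfold Pre_un_responsable_por_turno; infer_instance

def pvWitness_un_responsable_por_turno : List (List String) := [["a", "b"], ["a", "b"], ["a", "c"], ["a", "c"]]

def Spec_un_responsable_por_turno (grilla_horaria : List (List String)) (out : List (Bool × Bool)) : Prop := out = un_responsable_por_turno_alt grilla_horaria
instance (grilla_horaria : List (List String)) (out : List (Bool × Bool)) : Decidable (Spec_un_responsable_por_turno grilla_horaria out) := by unfold Spec_un_responsable_por_turno; infer_instance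

-- ===== CLAIM (what is proved, stated in full; the proofs are below) =====
def Claim_equal_un_responsable_por_turno : Prop := ∀ (grilla_horaria : List (List String)), Dom_un_responsable_por_turno grilla_horaria → Pre_un_responsable_por_turno grilla_horaria → Spec_un_responsable_por_turno grilla_horaria (un_responsable_por_turno grilla_horaria)

-- ===== LEMMAS AND PROOFS =====

-- "row i agrees with row i-1 in column j" — the comparison both programs make
def pvEq (g : List (List String)) (i j : Int) : Bool :=
  PySem.List.pyGetD (PySem.List.pyGetD g i []) j "" ==
    PySem.List.pyGetD (PySem.List.pyGetD g (i - 1) []) j ""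

-- flag array after processing the comparison indices in S
def pvG (g : List (List String)) (ncols : Nat) (S : List Int) : List Bool :=
  (PySem.List.pyRange 0 (ncols : Int) 1).map (fun j => S.all (fun i => pvEq g i j))

lemma pvG_nil (g : List (List String)) (ncols : Nat) :
    pvG g ncols [] = List.replicate ncols true := by
  simp [pvG, List.map_const']

lemma pvG_update (g : List (List String)) (ncols : Nat) (S : List Int) (i : Int) :
    (PySem.List.enumerate (pvG g ncols S)).map
      (fun p => p.2 && (PySem.List.pyGetD (PySem.List.pyGetD g i []) p.1 "" ==
                        PySem.List.pyGetD (PySem.List.pyGetD g (i - 1) []) p.1 ""))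
      = pvG g ncols (S ++ [i]) := by
  apply List.ext_getElem
  · simp [pvG, PySem.List.length_enumerate, PySem.List.length_pyRange_one]
  · intro k h1 h2
    rw [List.getElem_map, PySem.List.getElem_enumerate]
    simp only [pvG, List.getElem_map, PySem.List.getElem_pyRange_one, List.all_append,
      List.all_cons, List.all_nil, Bool.and_true, zero_add, pvEq]

lemma pvLoop_inv (g : List (List String)) (mid ncols : Nat) (k : Nat) :
    (PySem.List.pyRange 1 (1 + (k : Int)) 1).foldl
      (fun (st : List Bool × List Bool) i =>
        if i < (mid : Int) then
          ((PySem.List.enumerate st.1).map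
             (fun p => p.2 && (PySem.List.pyGetD (PySem.List.pyGetD g i []) p.1 "" ==
                               PySem.List.pyGetD (PySem.List.pyGetD g (i - 1) []) p.1 "")),
           st.2)
        else if (mid : Int) < i then
          (st.1,
           (PySem.List.enumerate st.2).map
             (fun p => p.2 && (PySem.List.pyGetD (PySem.List.pyGetD g i []) p.1 "" ==
                               PySem.List.pyGetD (PySem.List.pyGetD g (i - 1) []) p.1 "")))
        else st)
      (List.replicate ncols true, List.replicate ncols true)
    = (pvG g ncols ((PySem.List.pyRange 1 (1 + (k : Int)) 1).filter (fun i => decide (i < (mid : Int)))),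
       pvG g ncols ((PySem.List.pyRange 1 (1 + (k : Int)) 1).filter (fun i => decide ((mid : Int) < i)))) := by
  induction k with
  | zero =>
      rw [PySem.List.pyRange_one_eq_nil (by omega)]
      simp [pvG_nil]
  | succ m ih =>
      have hsplit : PySem.List.pyRange 1 (1 + ((m + 1 : Nat) : Int)) 1
          = PySem.List.pyRange 1 (1 + (m : Int)) 1 ++ [1 + (m : Int)] := by
        have : (1 + ((m + 1 : Nat) : Int)) = (1 + (m : Int)) + 1 := by push_cast; ring
        rw [this, PySem.List.pyRange_one_succ_right (by omega)]
      rw [hsplit, List.foldl_append, ih, List.filter_append, List.filter_append]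
      simp only [List.foldl_cons, List.foldl_nil]
      split_ifs with h1 h2
      · rw [pvG_update]
        have h2 : ¬ ((mid : Int) < 1 + (m : Int)) := by omega
        simp [h1, h2]
      · rw [pvG_update]
        simp [h1, h2]
      · simp [h1, h2]


lemma pvTodos_iff_chain (l : List String) :
    pvTodosIguales l = true ↔ l.IsChain (· = ·) := by
  unfold pvTodosIguales
  rw [List.all_eq_true, List.isChain_iff_getElem]
  constructor
  · intro h i hi
    have h1 := h (i : Int) (PySem.List.mem_pyRange_one.2 ⟨by omega, by omega⟩)
    rw [beq_iff_eq, PySem.List.pyGetD_eq_getElem _ _ (by omega) (by omega),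
        PySem.List.pyGetD_eq_getElem _ _ (by omega) (by omega)] at h1
    have e1 : ((i : Nat) : Int).toNat = i := by omega
    have e2 : (((i : Nat) : Int) + 1).toNat = i + 1 := by omega
    simp only [e1, e2] at h1
    exact h1
  · intro h x hx
    obtain ⟨h0, hlt⟩ := PySem.List.mem_pyRange_one.1 hx
    rw [beq_iff_eq, PySem.List.pyGetD_eq_getElem _ _ h0 (by omega),
        PySem.List.pyGetD_eq_getElem _ _ (by omega) (by omega)]
    have e2 : (x + 1).toNat = x.toNat + 1 := by omega
    simp only [e2]
    exact h x.toNat (by omega)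

lemma pvPrimera_eq_take (l : List String) :
    pvPrimeraMitad l = l.take (l.length / 2) := by
  unfold pvPrimeraMitad
  apply List.ext_getElem
  · rw [List.length_map, PySem.List.length_pyRange_one, List.length_take]
    omega
  · intro i h1 h2
    have hi : i < l.length / 2 := by
      simpa only [List.length_map, PySem.List.length_pyRange_one] using h1
    simp only [List.getElem_map, PySem.List.getElem_pyRange_one, zero_add,
      PySem.List.pyGetD_natCast, List.getElem_take]
    exact List.getD_eq_getElem _ _ (by omega)

lemma pvSegunda_eq_drop (l : List String) :
    pvSegundaMitad l = l.drop (l.length / 2) := by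
  unfold pvSegundaMitad
  rw [PySem.List.map_pyGetD_pyRange' l "" (by omega), Int.toNat_natCast]

lemma pvMap_getD_range_eq_map {α β : Type} (xs : List α) (d : α) (F : α → β) :
    (PySem.List.pyRange 0 (xs.length : Int) 1).map (fun i => F (PySem.List.pyGetD xs i d))
      = xs.map F := by
  have h : (fun i : Int => F (PySem.List.pyGetD xs i d))
      = F ∘ (fun i : Int => PySem.List.pyGetD xs i d) := rfl
  rw [h, ← List.map_map, PySem.List.map_pyGetD_pyRange_zero']

lemma pvA_map (T : List (List String)) :
    (PySem.List.pyRange 0 (T.length : Int) 1).map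
      (fun i => (pvTodosIguales (pvPrimeraMitad (PySem.List.pyGetD T i [])),
                 pvTodosIguales (pvSegundaMitad (PySem.List.pyGetD T i []))))
      = T.map (fun fila =>
          (pvTodosIguales (pvPrimeraMitad fila), pvTodosIguales (pvSegundaMitad fila))) :=
  pvMap_getD_range_eq_map T []
    (fun fila => (pvTodosIguales (pvPrimeraMitad fila), pvTodosIguales (pvSegundaMitad fila)))

-- first half of column j is uniform ⟺ every flagged comparison below the midpoint holds
lemma pvFirst_eq (g : List (List String)) (j : Int) :
    pvTodosIguales ((g.map (fun fila => PySem.List.pyGetD fila j "")).take (g.length / 2))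
    = ((PySem.List.pyRange 1 (g.length : Int) 1).filter
        (fun i => decide (i < ((g.length / 2 : Nat) : Int)))).all (fun i => pvEq g i j) := by
  have hmid : g.length / 2 ≤ g.length := Nat.div_le_self _ _
  have hlen : ((g.map (fun fila => PySem.List.pyGetD fila j "")).take (g.length / 2)).length
      = g.length / 2 := by
    rw [List.length_take, List.length_map]; omega
  rw [Bool.eq_iff_iff, pvTodos_iff_chain, List.isChain_iff_getElem, List.all_eq_true]
  constructor
  · intro h i hi
    rw [List.mem_filter, decide_eq_true_eq] at hi
    obtain ⟨hir, hlt⟩ := hi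
    obtain ⟨h1, h2⟩ := PySem.List.mem_pyRange_one.1 hir
    rw [pvEq, beq_iff_eq, PySem.List.pyGetD_eq_getElem g _ (by omega) (by omega),
        PySem.List.pyGetD_eq_getElem g _ (by omega) (by omega)]
    have hk : i.toNat - 1 + 1 < ((g.map (fun fila => PySem.List.pyGetD fila j "")).take
        (g.length / 2)).length := by omega
    have hc := h (i.toNat - 1) hk
    simp only [List.getElem_take, List.getElem_map] at hc
    have e1 : i.toNat - 1 + 1 = i.toNat := by omega
    have e2 : (i - 1).toNat = i.toNat - 1 := by omega
    simp only [e1] at hc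
    simp only [e2]
    exact hc.symm
  · intro h k hk
    simp only [List.getElem_take, List.getElem_map]
    have hk2 : k + 1 < g.length / 2 := by omega
    have hmem : ((k + 1 : Nat) : Int) ∈ (PySem.List.pyRange 1 (g.length : Int) 1).filter
        (fun i => decide (i < ((g.length / 2 : Nat) : Int))) := by
      rw [List.mem_filter, decide_eq_true_eq]
      exact ⟨PySem.List.mem_pyRange_one.2 ⟨by omega, by omega⟩, by omega⟩
    have hc := h _ hmem
    rw [pvEq, beq_iff_eq, PySem.List.pyGetD_eq_getElem g _ (by omega) (by omega),
        PySem.List.pyGetD_eq_getElem g _ (by omega) (by omega)] at hc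
    have e1 : (((k + 1 : Nat) : Int)).toNat = k + 1 := by omega
    have e2 : (((k + 1 : Nat) : Int) - 1).toNat = k := by omega
    simp only [e1, e2] at hc
    exact hc.symm

-- second half of column j is uniform ⟺ every flagged comparison above the midpoint holds
lemma pvSecond_eq (g : List (List String)) (j : Int) :
    pvTodosIguales ((g.map (fun fila => PySem.List.pyGetD fila j "")).drop (g.length / 2))
    = ((PySem.List.pyRange 1 (g.length : Int) 1).filter
        (fun i => decide (((g.length / 2 : Nat) : Int) < i))).all (fun i => pvEq g i j) := by
  have hmid : g.length / 2 ≤ g.length := Nat.div_le_self _ _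
  have hlen : ((g.map (fun fila => PySem.List.pyGetD fila j "")).drop (g.length / 2)).length
      = g.length - g.length / 2 := by
    rw [List.length_drop, List.length_map]
  rw [Bool.eq_iff_iff, pvTodos_iff_chain, List.isChain_iff_getElem, List.all_eq_true]
  constructor
  · intro h i hi
    rw [List.mem_filter, decide_eq_true_eq] at hi
    obtain ⟨hir, hlt⟩ := hi
    obtain ⟨h1, h2⟩ := PySem.List.mem_pyRange_one.1 hir
    rw [pvEq, beq_iff_eq, PySem.List.pyGetD_eq_getElem g _ (by omega) (by omega),
        PySem.List.pyGetD_eq_getElem g _ (by omega) (by omega)]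
    have hk : (i.toNat - g.length / 2 - 1) + 1 < ((g.map (fun fila => PySem.List.pyGetD fila j "")).drop
        (g.length / 2)).length := by omega
    have hc := h (i.toNat - g.length / 2 - 1) hk
    simp only [List.getElem_drop, List.getElem_map] at hc
    have e1 : g.length / 2 + (i.toNat - g.length / 2 - 1) = i.toNat - 1 := by omega
    have e2 : g.length / 2 + (i.toNat - g.length / 2 - 1 + 1) = i.toNat := by omega
    simp only [e1, e2] at hc
    have e3 : (i - 1).toNat = i.toNat - 1 := by omega
    simp only [e3]
    exact hc.symm
  · intro h k hk
    simp only [List.getElem_drop, List.getElem_map]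
    have hk2 : g.length / 2 + k + 1 < g.length := by omega
    have hmem : ((g.length / 2 + k + 1 : Nat) : Int) ∈ (PySem.List.pyRange 1 (g.length : Int) 1).filter
        (fun i => decide (((g.length / 2 : Nat) : Int) < i)) := by
      rw [List.mem_filter, decide_eq_true_eq]
      exact ⟨PySem.List.mem_pyRange_one.2 ⟨by omega, by omega⟩, by omega⟩
    have hc := h _ hmem
    rw [pvEq, beq_iff_eq, PySem.List.pyGetD_eq_getElem g _ (by omega) (by omega),
        PySem.List.pyGetD_eq_getElem g _ (by omega) (by omega)] at hc
    have e1 : (((g.length / 2 + k + 1 : Nat) : Int)).toNat = g.length / 2 + (k + 1) := by omega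
    have e2 : (((g.length / 2 + k + 1 : Nat) : Int) - 1).toNat = g.length / 2 + k := by omega
    simp only [e1, e2] at hc
    exact hc.symm

-- ===== VERDICT (by name: the statement is the Claim_ definition above) =====
theorem un_responsable_por_turno_spec : Claim_equal_un_responsable_por_turno := by
  intro g _ hpre
  have hn : 0 < g.length := List.length_pos_iff.2 hpre.1
  show un_responsable_por_turno g = un_responsable_por_turno_alt g
  unfold un_responsable_por_turno un_responsable_por_turno_alt pvTrasponerG
  dsimp only
  rw [PySem.List.foldl_append_singleton_eq_map, List.nil_append, pvA_map, List.map_map]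
  have hcast : (g.length : Int) = 1 + ((g.length - 1 : Nat) : Int) := by omega
  rw [hcast, pvLoop_inv, pvG, pvG, List.zip_map', ← hcast]
  apply List.map_congr_left
  intro j hj
  simp only [Function.comp_apply]
  rw [pvPrimera_eq_take, pvSegunda_eq_drop, List.length_map, pvFirst_eq, pvSecond_eq]
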